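-- pv_equiv track=rewrite | github.com/goglecm/GnuCashUtils | src/gnc_enrich/ml/predictor.py | _category_from_text
-- ===== SOURCE A (Python) =====
-- def _category_from_text(text: str, account_paths: list[str] | None = None) -> str:
--     """Suggest a category from free text using keyword heuristics.
--     If account_paths is provided, returns a leaf path from that list under the matched
--     heuristic category when possible; otherwise returns the top-level heuristic (e.g. Expenses:Food).
--     """
--     if not text:
--         return ""
--     text_lower = text.lower()
--     keywords = {
--         "Expenses:Food": [
--             "grocery",
--             "tesco",
--             "sainsbury",
--             "asda",
--             "lidl",
--             "aldi",
--             "food",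
--             "restaurant",
--             "cafe",
--         ],
--         "Expenses:Transport": [
--             "fuel",
--             "petrol",
--             "uber",
--             "train",
--             "bus",
--             "parking",
--             "transport",
--         ],
--         "Expenses:Entertainment": ["netflix", "spotify", "cinema", "theatre", "amazon prime"],
--         "Expenses:Utilities": [
--             "electric",
--             "gas",
--             "water",
--             "broadband",
--             "internet",
--             "phone",
--             "mobile",
--         ],
--     }
--     heuristic = "Expenses:Miscellaneous"
--     for category, kws in keywords.items():
--         if any(kw in text_lower for kw in kws):
--             heuristic = category
--             break
--     if not account_paths:
--         return heuristic
--     # Prefer a leaf under the heuristic: path P is a leaf if no other path has P as strict prefix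
--     under = [p for p in account_paths if p == heuristic or p.startswith(heuristic + ":")]
--     if not under:
--         return heuristic
--     path_set = set(account_paths)
--     leaves = [p for p in under if not any(p != q and q.startswith(p + ":") for q in path_set)]
--     return leaves[0] if leaves else heuristic
-- ===== SOURCE B (Python) =====
-- def _category_from_text(text: str, account_paths: list[str] | None = None) -> str:
--     """Suggest a category from free text using keyword heuristics.
--     Single pass over account_paths with a precomputed set of all proper
--     ancestor prefixes, instead of the all-pairs strict-prefix scan.
--     """
--     if not text:
--         return ""
--     text_lower = text.lower()
--     pairs = [
--         ("grocery", "Expenses:Food"),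
--         ("tesco", "Expenses:Food"),
--         ("sainsbury", "Expenses:Food"),
--         ("asda", "Expenses:Food"),
--         ("lidl", "Expenses:Food"),
--         ("aldi", "Expenses:Food"),
--         ("food", "Expenses:Food"),
--         ("restaurant", "Expenses:Food"),
--         ("cafe", "Expenses:Food"),
--         ("fuel", "Expenses:Transport"),
--         ("petrol", "Expenses:Transport"),
--         ("uber", "Expenses:Transport"),
--         ("train", "Expenses:Transport"),
--         ("bus", "Expenses:Transport"),
--         ("parking", "Expenses:Transport"),
--         ("transport", "Expenses:Transport"),
--         ("netflix", "Expenses:Entertainment"),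
--         ("spotify", "Expenses:Entertainment"),
--         ("cinema", "Expenses:Entertainment"),
--         ("theatre", "Expenses:Entertainment"),
--         ("amazon prime", "Expenses:Entertainment"),
--         ("electric", "Expenses:Utilities"),
--         ("gas", "Expenses:Utilities"),
--         ("water", "Expenses:Utilities"),
--         ("broadband", "Expenses:Utilities"),
--         ("internet", "Expenses:Utilities"),
--         ("phone", "Expenses:Utilities"),
--         ("mobile", "Expenses:Utilities"),
--     ]
--     heuristic = "Expenses:Miscellaneous"
--     for kw, cat in pairs:
--         if kw in text_lower:
--             heuristic = cat
--             break
--     if not account_paths: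
--         return heuristic
--     # every proper ancestor prefix of any path (the text before each ':')
--     ancestors = set()
--     for q in account_paths:
--         for i, ch in enumerate(q):
--             if ch == ":":
--                 ancestors.add(q[:i])
--     prefix = heuristic + ":"
--     for p in account_paths:
--         if (p == heuristic or p.startswith(prefix)) and p not in ancestors:
--             return p
--     return heuristic
-- ===== Notes on version B (the rewrite author's own statement) =====
-- stated objective: alternative
-- what changed: Replaces A's all-pairs strict-prefix scan (for each path under the heuristic, scan the whole path set for a descendant) with one precomputed set of every proper ancestor prefix and a single pass that returns the first leaf; the keyword dict-of-lists loop becomes one flat (keyword, category) scan.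
import Mathlib
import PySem

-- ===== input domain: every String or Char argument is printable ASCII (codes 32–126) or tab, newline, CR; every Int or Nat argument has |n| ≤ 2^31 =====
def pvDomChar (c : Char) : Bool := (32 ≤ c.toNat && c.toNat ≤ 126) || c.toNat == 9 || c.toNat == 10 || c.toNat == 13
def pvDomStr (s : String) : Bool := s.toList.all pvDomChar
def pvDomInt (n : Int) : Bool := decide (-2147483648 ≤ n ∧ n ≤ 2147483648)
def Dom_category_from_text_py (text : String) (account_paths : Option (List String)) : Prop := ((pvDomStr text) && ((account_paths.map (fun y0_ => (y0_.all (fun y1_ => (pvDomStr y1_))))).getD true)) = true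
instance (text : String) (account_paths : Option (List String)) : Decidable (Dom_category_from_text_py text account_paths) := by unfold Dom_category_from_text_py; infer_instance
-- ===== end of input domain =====

-- B replaces A's all-pairs strict-prefix leaf test by one precomputed set of
-- ancestor prefixes and a single pass over the paths (a different algorithm, same result).

-- ===== PORT A =====
-- the dict literal of A (dict[str, list[str]] → association list in insertion order)
def aKeywords : List (String × List String) :=
  [ ("Expenses:Food", ["grocery", "tesco", "sainsbury", "asda", "lidl", "aldi", "food", "restaurant", "cafe"]),
    ("Expenses:Transport", ["fuel", "petrol", "uber", "train", "bus", "parking", "transport"]),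
    ("Expenses:Entertainment", ["netflix", "spotify", "cinema", "theatre", "amazon prime"]),
    ("Expenses:Utilities", ["electric", "gas", "water", "broadband", "internet", "phone", "mobile"]) ]

-- the 'for category, kws in keywords.items(): if any(...): heuristic = category; break' loop
def aHeuLoop (tl : String) : List (String × List String) → String → String
  | [], h => h
  | (c, kws) :: rest, h =>
      if kws.any (fun kw => PySem.Str.isIn kw tl) then c else aHeuLoop tl rest h

def category_from_text_py (text : String) (account_paths : Option (List String)) : String :=
  if text = "" then ""
  else
    let text_lower := PySem.Str.lower text
    let heuristic := aHeuLoop text_lower aKeywords "Expenses:Miscellaneous"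
    match account_paths with
    | none => heuristic
    | some paths =>
      if paths = [] then heuristic
      else
        -- under = [p for p in account_paths if p == heuristic or p.startswith(heuristic + ":")]
        let under := paths.filter (fun p =>
          decide (p = heuristic) || PySem.Chars.startswith p.toList (heuristic.toList ++ [':']))
        if under = [] then heuristic
        else
          let path_set := PySem.Set.ofList paths
          -- leaves = [p for p in under if not any(p != q and q.startswith(p + ":") for q in path_set)]
          let leaves := under.filter (fun p =>
            ! path_set.any (fun q => !(decide (q = p)) && PySem.Chars.startswith q.toList (p.toList ++ [':'])))
          -- leaves[0] if leaves else heuristic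
          (leaves.head?).getD heuristic

-- ===== PORT B =====
-- the flat (keyword, category) list of Source B
def bPairs : List (String × String) :=
  [ ("grocery", "Expenses:Food"), ("tesco", "Expenses:Food"), ("sainsbury", "Expenses:Food"),
    ("asda", "Expenses:Food"), ("lidl", "Expenses:Food"), ("aldi", "Expenses:Food"),
    ("food", "Expenses:Food"), ("restaurant", "Expenses:Food"), ("cafe", "Expenses:Food"),
    ("fuel", "Expenses:Transport"), ("petrol", "Expenses:Transport"), ("uber", "Expenses:Transport"),
    ("train", "Expenses:Transport"), ("bus", "Expenses:Transport"), ("parking", "Expenses:Transport"),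
    ("transport", "Expenses:Transport"),
    ("netflix", "Expenses:Entertainment"), ("spotify", "Expenses:Entertainment"),
    ("cinema", "Expenses:Entertainment"), ("theatre", "Expenses:Entertainment"),
    ("amazon prime", "Expenses:Entertainment"),
    ("electric", "Expenses:Utilities"), ("gas", "Expenses:Utilities"), ("water", "Expenses:Utilities"),
    ("broadband", "Expenses:Utilities"), ("internet", "Expenses:Utilities"),
    ("phone", "Expenses:Utilities"), ("mobile", "Expenses:Utilities") ]

-- 'for kw, cat in pairs: if kw in text_lower: heuristic = cat; break'
def bHeuLoop (tl : String) : List (String × String) → String → String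
  | [], h => h
  | (kw, c) :: rest, h => if PySem.Str.isIn kw tl then c else bHeuLoop tl rest h

-- 'for q in account_paths: for i, ch in enumerate(q): if ch == ":": ancestors.add(q[:i])'
-- (q[:i] with the nonnegative enumerate index i is q.toList.take i)
def bAncestors (paths : List String) : PySem.Set (List Char) :=
  paths.foldl (fun s q =>
    (PySem.List.enumerate q.toList 0).foldl
      (fun s ic => if ic.2 = ':' then PySem.Set.add s (q.toList.take ic.1.toNat) else s) s)
    PySem.Set.empty

-- 'for p in account_paths: if (p == heuristic or p.startswith(prefix)) and p not in ancestors: return p'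
def bFind (h : String) (pre : List Char) (anc : PySem.Set (List Char)) : List String → String
  | [] => h
  | p :: rest =>
      if (decide (p = h) || PySem.Chars.startswith p.toList pre) && !(PySem.Set.contains anc p.toList)
      then p else bFind h pre anc rest

def category_from_text_py_alt (text : String) (account_paths : Option (List String)) : String :=
  if text = "" then ""
  else
    let text_lower := PySem.Str.lower text
    let heuristic := bHeuLoop text_lower bPairs "Expenses:Miscellaneous"
    match account_paths with
    | none => heuristic
    | some paths =>
      if paths = [] then heuristic
      else
        let ancestors := bAncestors paths
        bFind heuristic (heuristic.toList ++ [':']) ancestors paths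

-- ===== PRECONDITION & SPEC =====
def Spec_category_from_text_py (text : String) (account_paths : Option (List String)) (out : String) : Prop := out = category_from_text_py_alt text account_paths
instance (text : String) (account_paths : Option (List String)) (out : String) : Decidable (Spec_category_from_text_py text account_paths out) := by unfold Spec_category_from_text_py; infer_instance

-- ===== CLAIM (what is proved, stated in full; the proofs are below) =====
def Claim_equal_category_from_text_py : Prop := ∀ (text : String) (account_paths : Option (List String)), Dom_category_from_text_py text account_paths → Spec_category_from_text_py text account_paths (category_from_text_py text account_paths)

-- ===== LEMMAS AND PROOFS =====

-- nested-if form of an 'any' test, to align A's per-category 'any' with B's flat scan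
theorem pv_if_or (a b : Bool) (x y : String) :
    (if (a || b) = true then x else y) = if a = true then x else if b = true then x else y := by
  cases a <;> simp

-- the two keyword scans agree for every text
theorem pv_heu_eq (tl : String) :
    aHeuLoop tl aKeywords "Expenses:Miscellaneous" = bHeuLoop tl bPairs "Expenses:Miscellaneous" := by
  simp only [aKeywords, bPairs, aHeuLoop, bHeuLoop, List.any_cons, List.any_nil,
    Bool.or_false, pv_if_or]

-- membership in the inner enumerate-fold of bAncestors
theorem pv_mem_inner (q : List Char) (l : List (Int × Char)) (s : PySem.Set (List Char)) (x : List Char) :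
    x ∈ l.foldl (fun s ic => if ic.2 = ':' then PySem.Set.add s (q.take ic.1.toNat) else s) s ↔
      x ∈ s ∨ ∃ ic ∈ l, ic.2 = ':' ∧ x = q.take ic.1.toNat := by
  induction l generalizing s with
  | nil => simp
  | cons ic rest ih =>
    simp only [List.foldl_cons, List.mem_cons]
    rw [ih]
    by_cases hc : ic.2 = ':'
    · rw [if_pos hc, PySem.Set.mem_add]
      constructor
      · rintro ((h | h) | ⟨jc, hm, h1, h2⟩)
        · exact Or.inl h
        · exact Or.inr ⟨ic, Or.inl rfl, hc, h⟩
        · exact Or.inr ⟨jc, Or.inr hm, h1, h2⟩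
      · rintro (h | ⟨jc, (hm | hm), h1, h2⟩)
        · exact Or.inl (Or.inl h)
        · subst hm; exact Or.inl (Or.inr h2)
        · exact Or.inr ⟨jc, hm, h1, h2⟩
    · rw [if_neg hc]
      constructor
      · rintro (h | ⟨jc, hm, h1, h2⟩)
        · exact Or.inl h
        · exact Or.inr ⟨jc, Or.inr hm, h1, h2⟩
      · rintro (h | ⟨jc, (hm | hm), h1, h2⟩)
        · exact Or.inl h
        · subst hm; exact absurd h1 hc
        · exact Or.inr ⟨jc, hm, h1, h2⟩

-- membership in bAncestors: exactly the proper ancestor prefixes of the paths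
theorem pv_mem_anc (paths : List String) (x : List Char) :
    x ∈ bAncestors paths ↔
      ∃ q ∈ paths, ∃ i : Nat, i < q.toList.length ∧ q.toList[i]? = some ':' ∧ x = q.toList.take i := by
  have main : ∀ (ps : List String) (s : PySem.Set (List Char)),
      x ∈ ps.foldl (fun s q =>
        (PySem.List.enumerate q.toList 0).foldl
          (fun s ic => if ic.2 = ':' then PySem.Set.add s (q.toList.take ic.1.toNat) else s) s) s ↔
      x ∈ s ∨ ∃ q ∈ ps, ∃ i : Nat, i < q.toList.length ∧ q.toList[i]? = some ':' ∧ x = q.toList.take i := by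
    intro ps
    induction ps with
    | nil => simp
    | cons q rest ih =>
      intro s
      simp only [List.foldl_cons, ih, pv_mem_inner, List.mem_cons]
      constructor
      · rintro ((h | ⟨ic, hm, h1, h2⟩) | ⟨r, hm, hi⟩)
        · exact Or.inl h
        · rcases (PySem.List.mem_enumerate_iff _ _ _).1 hm with ⟨k, hk, hic⟩
          subst hic
          refine Or.inr ⟨q, Or.inl rfl, k, hk, ?_, ?_⟩
          · simp only at h1
            rw [List.getElem?_eq_getElem hk, h1]
          · simpa using h2
        · exact Or.inr ⟨r, Or.inr hm, hi⟩
      · rintro (h | ⟨r, (hm | hm), i, hi, h1, h2⟩)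
        · exact Or.inl (Or.inl h)
        · subst hm
          have hg : r.toList[i] = ':' := by
            rw [List.getElem?_eq_getElem hi] at h1
            exact Option.some_inj.1 h1
          refine Or.inl (Or.inr ⟨((i : Int), r.toList[i]), ?_, by simpa using hg, by simpa using h2⟩)
          exact (PySem.List.mem_enumerate_iff _ _ _).2 ⟨i, hi, by simp⟩
        · exact Or.inr ⟨r, hm, i, hi, h1, h2⟩
  simpa [bAncestors] using main paths PySem.Set.empty

-- A's strict-descendant test for one pair (q, p) equals 'p.toList is an ancestor prefix of q'
theorem pv_pair_iff (p q : String) :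
    ((!(decide (q = p))) && PySem.Chars.startswith q.toList (p.toList ++ [':'])) = true ↔
      ∃ i : Nat, i < q.toList.length ∧ q.toList[i]? = some ':' ∧ p.toList = q.toList.take i := by
  constructor
  · rintro h
    rw [Bool.and_eq_true] at h
    obtain ⟨-, hsw⟩ := h
    obtain ⟨t, ht⟩ := (PySem.Chars.startswith_iff _ _).1 hsw
    have ht' : q.toList = p.toList ++ ':' :: t := by rw [← ht]; simp
    refine ⟨p.toList.length, ?_, ?_, ?_⟩
    · rw [ht']; simp
    · rw [ht', List.getElem?_append_right (le_refl _)]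
      simp
    · rw [ht']; simp
  · rintro ⟨i, hi, hget, htake⟩
    have hdrop : q.toList.drop i = ':' :: q.toList.drop (i + 1) := by
      have hcd := List.getElem_cons_drop hi
      rw [List.getElem?_eq_getElem hi] at hget
      rw [Option.some_inj.1 hget] at hcd
      exact hcd.symm
    have hq : q.toList = p.toList ++ ':' :: q.toList.drop (i + 1) := by
      rw [htake, ← hdrop, List.take_append_drop]
    rw [Bool.and_eq_true]
    constructor
    · have hne : q ≠ p := by
        intro he
        have hlen : q.toList.length = p.toList.length := by rw [he]
        rw [htake, List.length_take, min_eq_left (Nat.le_of_lt hi)] at hlen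
        omega
      simp [hne]
    · exact (PySem.Chars.startswith_iff _ _).2 ⟨q.toList.drop (i + 1), by (conv_rhs => rw [hq]); simp⟩

-- A's set-scan leaf test equals B's ancestor-set lookup, pointwise
theorem pv_leaf_eq (paths : List String) (p : String) :
    (PySem.Set.ofList paths).any
        (fun q => !(decide (q = p)) && PySem.Chars.startswith q.toList (p.toList ++ [':'])) =
      PySem.Set.contains (bAncestors paths) p.toList := by
  rcases hb : PySem.Set.contains (bAncestors paths) p.toList with _ | _
  · rw [List.any_eq_false]
    intro q hq
    simp only [Bool.not_eq_true]
    rcases hqa : (!(decide (q = p))) && PySem.Chars.startswith q.toList (p.toList ++ [':']) with _ | _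
    · rfl
    · exfalso
      obtain ⟨i, hi, h1, h2⟩ := (pv_pair_iff p q).1 hqa
      have : p.toList ∈ bAncestors paths :=
        (pv_mem_anc paths p.toList).2 ⟨q, (PySem.Set.mem_ofList _ _).1 hq, i, hi, h1, h2⟩
      rw [← PySem.Set.contains_iff] at this
      rw [hb] at this
      exact Bool.false_ne_true this
  · rw [List.any_eq_true]
    have := (PySem.Set.contains_iff (bAncestors paths) p.toList).1 hb
    obtain ⟨q, hq, i, hi, h1, h2⟩ := (pv_mem_anc paths p.toList).1 this
    exact ⟨q, (PySem.Set.mem_ofList _ _).2 hq, (pv_pair_iff p q).2 ⟨i, hi, h1, h2⟩⟩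

-- B's scan returns the head of the corresponding filter (with default h)
theorem pv_bFind_eq (h : String) (pre : List Char) (anc : PySem.Set (List Char)) (ps : List String) :
    bFind h pre anc ps =
      ((ps.filter (fun p =>
          (decide (p = h) || PySem.Chars.startswith p.toList pre) && !(PySem.Set.contains anc p.toList))).head?).getD h := by
  induction ps with
  | nil => simp [bFind]
  | cons p rest ih =>
    rw [show bFind h pre anc (p :: rest) =
          (if ((decide (p = h) || PySem.Chars.startswith p.toList pre) && !(PySem.Set.contains anc p.toList)) = true
           then p else bFind h pre anc rest) from rfl,
        List.filter_cons]
    rcases hc : (decide (p = h) || PySem.Chars.startswith p.toList pre) && !(PySem.Set.contains anc p.toList) with _ | _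
    · rw [if_neg (by simp), if_neg (by simp)]
      exact ih
    · rw [if_pos rfl, if_pos rfl]
      rfl

-- ===== VERDICT (by name: the statement is the Claim_ definition above) =====
theorem category_from_text_py_spec : Claim_equal_category_from_text_py := by
  intro text account_paths _
  unfold Spec_category_from_text_py category_from_text_py category_from_text_py_alt
  by_cases ht : text = ""
  · simp [ht]
  · simp only [ht, if_false]
    rw [pv_heu_eq]
    set h := bHeuLoop (PySem.Str.lower text) bPairs "Expenses:Miscellaneous" with hh
    match account_paths with
    | none => rfl
    | some paths =>
      by_cases hp : paths = []
      · simp [hp]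
      · simp only [hp, if_false]
        rw [pv_bFind_eq]
        have hfilter :
            (paths.filter (fun p =>
                (decide (p = h) || PySem.Chars.startswith p.toList (h.toList ++ [':'])) &&
                  !(PySem.Set.contains (bAncestors paths) p.toList))) =
            ((paths.filter (fun p => decide (p = h) || PySem.Chars.startswith p.toList (h.toList ++ [':']))).filter
              (fun p => ! (PySem.Set.ofList paths).any
                (fun q => !(decide (q = p)) && PySem.Chars.startswith q.toList (p.toList ++ [':'])))) := by
          rw [List.filter_filter]
          apply List.filter_congr
          intro p _
          rw [pv_leaf_eq paths p]
          exact (Bool.and_comm _ _).symm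
        by_cases hu : paths.filter (fun p => decide (p = h) || PySem.Chars.startswith p.toList (h.toList ++ [':'])) = []
        · rw [if_pos hu, hfilter, hu]
          rfl
        · rw [if_neg hu, hfilter]
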